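-- pv_equiv track=rewrite | github.com/pyember/ember | src/ember/models/catalog/__init__.py | _sanitize_constant_name
-- ===== SOURCE A (Python) =====
-- def _sanitize_constant_name(model_id: str) -> str:
--     """Transform a model identifier into an exported constant name.
--
--     Args:
--         model_id: Model identifier to normalize.
--
--     Returns:
--         str: Uppercase constant-style representation.
--
--     Examples:
--         >>> _sanitize_constant_name('gpt-4.1-mini')
--         'GPT_4_1_MINI'
--     """
--     out = []
--     for ch in model_id:
--         if ch.isalnum():
--             out.append(ch.upper())
--         else:
--             out.append("_")
--     name = "".join(out)
--     # Collapse consecutive underscores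
--     while "__" in name:
--         name = name.replace("__", "_")
--     # Trim underscores
--     return name.strip("_")
-- ===== SOURCE B (Python) =====
-- def _sanitize_constant_name(model_id: str) -> str:
--     tokens = []
--     buf = []
--     for ch in model_id:
--         if ch.isalnum():
--             buf.append(ch)
--         else:
--             if buf:
--                 tokens.append("".join(buf))
--                 buf = []
--     if buf:
--         tokens.append("".join(buf))
--     return "_".join(tokens).upper()
-- ===== Notes on version B (the rewrite author's own statement) =====
-- stated objective: faster
-- what changed: Replaces the per-character mapping followed by repeated whole-string collapse-replacement passes and a final trim with a single tokenizing scan that collects the maximal alphanumeric runs and joins them with single separators before uppercasing; collapsing and trimming happen implicitly because only non-empty runs become tokens.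
import Mathlib
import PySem

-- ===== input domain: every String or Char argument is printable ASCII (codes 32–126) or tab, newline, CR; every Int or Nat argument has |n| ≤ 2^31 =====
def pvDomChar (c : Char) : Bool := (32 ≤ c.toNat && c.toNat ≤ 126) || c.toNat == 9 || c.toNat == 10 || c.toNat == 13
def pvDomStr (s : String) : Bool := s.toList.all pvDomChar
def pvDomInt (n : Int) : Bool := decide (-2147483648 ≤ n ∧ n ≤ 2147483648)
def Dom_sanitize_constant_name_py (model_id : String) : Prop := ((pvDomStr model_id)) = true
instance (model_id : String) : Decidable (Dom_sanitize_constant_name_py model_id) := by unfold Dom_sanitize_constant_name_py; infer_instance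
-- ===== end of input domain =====

-- B replaces A's map-then-collapse-then-strip pipeline (repeated whole-string replace passes)
-- by a single tokenizing scan that joins the alnum runs with single separators (measured faster in a timing run).

-- ===== PORT A =====
-- the `while "__" in name` loop, ported with fuel = name.length: each replace pass strictly
-- shortens the string, so the loop always exits within that many iterations.
def pvCollapseA : Nat → List Char → List Char
  | 0, s => s
  | fuel+1, s =>
    if PySem.Chars.isIn ['_', '_'] s then
      pvCollapseA fuel (PySem.Chars.replace s ['_', '_'] ['_'])
    else s

def sanitize_constant_name_py (model_id : String) : String :=
  let out := model_id.toList.foldl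
    (fun acc ch => acc ++ [if PySem.Chars.isalnum ch then PySem.Chars.upperChar ch else '_']) []
  let name := pvCollapseA out.length out
  String.mk (PySem.Chars.stripChars name ['_'])

-- ===== PORT B =====
def sanitize_constant_name_py_alt (model_id : String) : String :=
  let st := model_id.toList.foldl
    (fun (st : List (List Char) × List Char) ch =>
      if PySem.Chars.isalnum ch then (st.1, st.2 ++ [ch])
      else if st.2.isEmpty then st else (st.1 ++ [st.2], ([] : List Char)))
    ([], [])
  let toks := if st.2.isEmpty then st.1 else st.1 ++ [st.2]
  String.mk (PySem.Chars.upper (PySem.Chars.join ['_'] toks))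

-- ===== PRECONDITION & SPEC =====
def Spec_sanitize_constant_name_py (model_id : String) (out : String) : Prop := out = sanitize_constant_name_py_alt model_id
instance (model_id : String) (out : String) : Decidable (Spec_sanitize_constant_name_py model_id out) := by unfold Spec_sanitize_constant_name_py; infer_instance

-- ===== CLAIM (what is proved, stated in full; the proofs are below) =====
def Claim_equal_sanitize_constant_name_py : Prop := ∀ (model_id : String), Dom_sanitize_constant_name_py model_id → Spec_sanitize_constant_name_py model_id (sanitize_constant_name_py model_id)

-- ===== LEMMAS AND PROOFS =====

-- one replace("__","_") pass, written as plain structural recursion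
def pvRep : List Char → List Char
  | '_' :: '_' :: t => '_' :: pvRep t
  | c :: t => c :: pvRep t
  | [] => []

-- does the string contain two adjacent underscores?
def pvAdj : List Char → Bool
  | '_' :: '_' :: _ => true
  | _ :: t => pvAdj t
  | [] => false

-- the maximal runs of non-'_' characters
def pvT : List Char → List (List Char)
  | [] => []
  | c :: t =>
    if c = '_' then pvT t
    else match t with
      | [] => [[c]]
      | d :: _ =>
        if d = '_' then [c] :: pvT t
        else match pvT t with
          | [] => [[c]]
          | r :: rs => (c :: r) :: rs

-- the maximal runs of alnum characters
def pvR : List Char → List (List Char)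
  | [] => []
  | c :: t =>
    if PySem.Chars.isalnum c then
      match t with
      | [] => [[c]]
      | d :: _ =>
        if PySem.Chars.isalnum d then
          match pvR t with
          | [] => [[c]]
          | r :: rs => (c :: r) :: rs
        else [c] :: pvR t
    else pvR t

-- B's scan, with the pending buffer explicit
def pvRW : List Char → List Char → List (List Char)
  | buf, [] => if buf.isEmpty then [] else [buf]
  | buf, c :: t =>
    if PySem.Chars.isalnum c then pvRW (buf ++ [c]) t
    else (if buf.isEmpty then [] else [buf]) ++ pvRW [] t

-- strip of trailing '_' only
def pvRS (s : List Char) : List Char :=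
  (List.dropWhile (fun c => (['_'] : List Char).contains c) s.reverse).reverse

def pvF : Char → Char := fun ch => if PySem.Chars.isalnum ch then PySem.Chars.upperChar ch else '_'

lemma pvNilSide {c : Char} : ∀ t1 : List Char, c = '_' → ([] : List Char) = '_' :: t1 → False := by
  intro _ _ h; cases h

lemma pvConsSide {c d : Char} {t : List Char} (h : ¬(c = '_' ∧ d = '_')) :
    ∀ t1 : List Char, c = '_' → (d :: t) = '_' :: t1 → False := by
  intro t1 h1 h2
  injection h2 with h3 _
  exact h ⟨h1, h3⟩

lemma pvGoEq : ∀ (fuel : Nat) (l acc : List Char), l.length ≤ fuel →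
    PySem.Chars.replace.go ['_', '_'] ['_'] fuel l acc = acc.reverse ++ pvRep l := by
  intro fuel
  induction fuel with
  | zero =>
    intro l acc h
    have : l = [] := by cases l <;> simp_all
    subst this
    simp [PySem.Chars.replace.go, pvRep]
  | succ n ih =>
    intro l acc h
    match l with
    | [] => simp [PySem.Chars.replace.go, pvRep]
    | c :: t =>
      rw [PySem.Chars.replace.go]
      by_cases hp : (['_', '_'] : List Char).isPrefixOf (c :: t) = true
      · match t, hp with
        | d :: t', hp =>
          simp only [List.isPrefixOf, beq_iff_eq, Bool.and_eq_true] at hp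
          obtain ⟨h1, h2, -⟩ := hp
          subst h1; subst h2
          simp only [if_pos (by simp [List.isPrefixOf] : (['_', '_'] : List Char).isPrefixOf ('_' :: '_' :: t') = true)]
          rw [ih _ _ (by simp at h ⊢; omega)]
          simp [pvRep]
        | [], hp => simp [List.isPrefixOf] at hp
      · rw [if_neg hp, ih _ _ (by simp at h ⊢; omega)]
        have hpat : pvRep (c :: t) = c :: pvRep t := by
          match c, t with
          | c, [] => exact pvRep.eq_2 c [] pvNilSide
          | c, d :: t' =>
            refine pvRep.eq_2 c (d :: t') (pvConsSide ?_)
            rintro ⟨rfl, rfl⟩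
            simp [List.isPrefixOf] at hp
        rw [hpat]; simp

lemma pvReplaceEq (s : List Char) : PySem.Chars.replace s ['_', '_'] ['_'] = pvRep s := by
  rw [PySem.Chars.replace]
  simp [pvGoEq s.length s [] le_rfl]

lemma pvAdj_cons_eq {c : Char} {t : List Char} (h : ¬(c = '_' ∧ t.head? = some '_')) :
    pvAdj (c :: t) = pvAdj t := by
  match c, t with
  | c, [] => exact pvAdj.eq_2 c [] pvNilSide
  | c, d :: t' =>
    refine pvAdj.eq_2 c (d :: t') (pvConsSide ?_)
    rintro ⟨rfl, rfl⟩
    exact h ⟨rfl, rfl⟩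

lemma pvAdj_iff (s : List Char) : pvAdj s = true ↔ ['_', '_'] <:+: s := by
  induction s with
  | nil => simp [pvAdj]
  | cons c t ih =>
    by_cases hdb : c = '_' ∧ t.head? = some '_'
    · obtain ⟨rfl, hh⟩ := hdb
      obtain ⟨t', rfl⟩ : ∃ t', t = '_' :: t' := by
        cases t with
        | nil => simp at hh
        | cons d t' =>
          have : d = '_' := by simpa using hh
          exact ⟨t', by rw [this]⟩
      simp only [pvAdj, true_iff]
      exact ⟨[], t', by simp⟩
    · rw [pvAdj_cons_eq hdb, ih]
      constructor
      · exact List.infix_cons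
      · intro h
        rw [List.infix_cons_iff] at h
        rcases h with h | h
        · obtain ⟨u, hu⟩ := h
          have hc : c = '_' := by
            have := congrArg List.head? hu; simpa using this.symm
          have ht : t = '_' :: u := by
            have := congrArg List.tail hu; simpa using this.symm
          exact absurd ⟨hc, by rw [ht]; rfl⟩ hdb
        · exact h

lemma pvIsIn_eq (s : List Char) : PySem.Chars.isIn ['_', '_'] s = pvAdj s := by
  by_cases h : pvAdj s = true
  · rw [h, (PySem.Chars.isIn_iff_infix _ _).mpr ((pvAdj_iff s).mp h)]
  · simp only [Bool.not_eq_true] at h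
    rw [h]
    by_contra hne
    have : PySem.Chars.isIn ['_','_'] s = true := by
      cases hq : PySem.Chars.isIn ['_','_'] s <;> simp_all
    have := (pvAdj_iff s).mpr ((PySem.Chars.isIn_iff_infix _ _).mp this)
    simp_all

lemma pvRep_le (s : List Char) : (pvRep s).length ≤ s.length := by
  induction s using pvRep.induct with
  | case1 t ih => rw [pvRep]; simp; omega
  | case2 c t hside ih => rw [pvRep.eq_2 c t hside]; simp; omega
  | case3 => simp [pvRep]

lemma pvRep_len (s : List Char) (h : pvAdj s = true) : (pvRep s).length < s.length := by
  induction s using pvRep.induct with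
  | case1 t ih =>
    rw [pvRep]
    have := pvRep_le t
    simp; omega
  | case2 c t hside ih =>
    rw [pvRep.eq_2 c t hside]
    have ht : pvAdj t = true := by
      rwa [pvAdj_cons_eq] at h
      rintro ⟨rfl, hh⟩
      obtain ⟨t', rfl⟩ : ∃ t', t = '_' :: t' := by
        cases t with
        | nil => simp at hh
        | cons d t' =>
          have : d = '_' := by simpa using hh
          exact ⟨t', by rw [this]⟩
      exact hside t' rfl rfl
    have := ih ht
    simp; omega
  | case3 => simp [pvAdj] at h

lemma pvRep_head (s : List Char) : (pvRep s).head? = s.head? := by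
  induction s using pvRep.induct with
  | case1 t ih => rw [pvRep]; rfl
  | case2 c t hside ih => rw [pvRep.eq_2 c t hside]; rfl
  | case3 => rfl

lemma pvT_cons_eq {c : Char} {t : List Char} (hc : c ≠ '_') :
    pvT (c :: t) = (match t with
      | [] => [[c]]
      | d :: _ =>
        if d = '_' then [c] :: pvT t
        else match pvT t with
          | [] => [[c]]
          | r :: rs => (c :: r) :: rs) := by
  rw [pvT.eq_def]
  simp [hc]

lemma pvT_us {t : List Char} : pvT ('_' :: t) = pvT t := by
  rw [pvT.eq_def]; simp

lemma pvT_rep (s : List Char) : pvT (pvRep s) = pvT s := by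
  induction s using pvRep.induct with
  | case1 t ih => rw [pvRep, pvT_us, pvT_us, pvT_us, ih]
  | case2 c t hside ih =>
    rw [pvRep.eq_2 c t hside]
    by_cases hc : c = '_'
    · subst hc; rw [pvT_us, pvT_us, ih]
    · rw [pvT_cons_eq hc, pvT_cons_eq hc]
      match t, pvRep_head t with
      | [], _ => rfl
      | d :: t', hh =>
        have : ∃ u, pvRep (d :: t') = d :: u := by
          match hu : pvRep (d :: t'), hh with
          | e :: u, hh => simp at hh; exact ⟨u, by rw [hh]⟩
        obtain ⟨u, hu⟩ := this
        rw [hu]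
        simp only
        rw [← hu, ih]
  | case3 => rfl

lemma pvAdj_tail (c : Char) (t : List Char) (h : pvAdj (c :: t) = false) : pvAdj t = false := by
  by_cases hdb : c = '_' ∧ t.head? = some '_'
  · obtain ⟨rfl, hh⟩ := hdb
    obtain ⟨t', rfl⟩ : ∃ t', t = '_' :: t' := by
      cases t with
      | nil => simp at hh
      | cons d t' =>
        have : d = '_' := by simpa using hh
        exact ⟨t', by rw [this]⟩
    simp [pvAdj] at h
  · rwa [pvAdj_cons_eq hdb] at h

lemma pvT_consShape : ∀ (t : List Char) (c : Char), c ≠ '_' →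
    ∃ r rs, pvT (c :: t) = (c :: r) :: rs := by
  intro t
  induction t with
  | nil => intro c hc; rw [pvT_cons_eq hc]; exact ⟨[], [], rfl⟩
  | cons d t' ih =>
    intro c hc
    rw [pvT_cons_eq hc]
    by_cases hd : d = '_'
    · subst hd; simp only [if_pos rfl]; exact ⟨[], pvT ('_' :: t'), rfl⟩
    · simp only [if_neg hd]
      obtain ⟨r, rs, hr⟩ := ih d hd
      rw [hr]
      exact ⟨d :: r, rs, rfl⟩

lemma pvInter_cons_cons (s x y : List Char) (zs : List (List Char)) :
    List.intercalate s (x :: y :: zs) = x ++ s ++ List.intercalate s (y :: zs) := by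
  simp [List.intercalate, List.intersperse]

lemma pvInter_single (s x : List Char) : List.intercalate s [x] = x := by
  simp [List.intercalate]

lemma pvInter_consHead (c : Char) (r : List Char) (rs : List (List Char)) :
    List.intercalate ['_'] ((c :: r) :: rs) = c :: List.intercalate ['_'] (r :: rs) := by
  cases rs with
  | nil => simp [pvInter_single]
  | cons y ys => rw [pvInter_cons_cons, pvInter_cons_cons]; simp

lemma pvRS_cons (c : Char) (y : List Char) :
    pvRS (c :: y) = if pvRS y = [] then (if c = '_' then [] else [c]) else c :: pvRS y := by
  unfold pvRS
  rw [List.reverse_cons, List.dropWhile_append]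
  by_cases h : List.dropWhile (fun c : Char => (['_'] : List Char).contains c) y.reverse = []
  · rw [h]
    by_cases hc : c = '_' <;> simp [List.dropWhile, hc]
  · have h2 : (List.dropWhile (fun c : Char => (['_'] : List Char).contains c) y.reverse).isEmpty = false := by
      simpa [List.isEmpty_iff] using h
    rw [h2]
    simp only [Bool.false_eq_true, if_false, List.reverse_append, List.reverse_cons,
      List.reverse_nil, List.nil_append, List.singleton_append]
    rw [if_neg (by simpa using h)]

lemma pvT_cons_us {c : Char} {t : List Char} (hc : c ≠ '_') :
    pvT (c :: '_' :: t) = [c] :: pvT t := by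
  rw [pvT_cons_eq hc]
  simp [pvT_us]

lemma pvT_cons2 {c d : Char} {t r : List Char} {rs : List (List Char)} (hc : c ≠ '_') (hd : d ≠ '_')
    (h : pvT (d :: t) = (d :: r) :: rs) : pvT (c :: d :: t) = (c :: d :: r) :: rs := by
  rw [pvT_cons_eq hc]
  simp only [if_neg hd, h]

lemma pvT_single {c : Char} (hc : c ≠ '_') : pvT [c] = [[c]] := by
  rw [pvT_cons_eq hc]

lemma pvRS_noAdj : ∀ (n : Nat) (s : List Char), s.length ≤ n → pvAdj s = false →
    (∀ c, s.head? = some c → c ≠ '_') →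
    pvRS s = List.intercalate ['_'] (pvT s) := by
  intro n
  induction n with
  | zero =>
    intro s h _ _
    have : s = [] := by cases s <;> simp_all
    subst this
    simp [pvRS, pvT, List.intercalate]
  | succ m ih =>
    intro s hlen hadj hhd
    match s with
    | [] => simp [pvRS, pvT, List.intercalate]
    | c :: t =>
      have hc : c ≠ '_' := hhd c rfl
      match t with
      | [] =>
        rw [pvRS_cons, pvT_single hc, pvInter_single]
        simp [pvRS, hc]
      | d :: t' =>
        by_cases hd : d = '_'
        · subst hd
          have hadj' : pvAdj t' = false := pvAdj_tail _ _ (pvAdj_tail _ _ hadj)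
          have hhd' : ∀ e, t'.head? = some e → e ≠ '_' := by
            intro e he rfl
            obtain ⟨t'', rfl⟩ : ∃ t'', t' = '_' :: t'' := by
              cases t' with
              | nil => simp at he
              | cons x t'' =>
                have : x = '_' := by simpa using he
                exact ⟨t'', by rw [this]⟩
            have : pvAdj (c :: '_' :: '_' :: t'') = true := by
              rw [pvAdj_cons_eq (by simp [hc])]; simp [pvAdj]
            simp_all
          have hIH : pvRS t' = List.intercalate ['_'] (pvT t') := by
            apply ih t' (by simp at hlen ⊢; omega) hadj' hhd'
          rw [pvT_cons_us hc]
          rw [pvRS_cons, pvRS_cons, hIH]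
          cases ht' : pvT t' with
          | nil =>
            simp [List.intercalate, hc]
          | cons r rs =>
            have hne : List.intercalate ['_'] (r :: rs) ≠ [] := by
              obtain ⟨e, t'', rfl⟩ : ∃ e t'', t' = e :: t'' := by
                cases t' with
                | nil => simp [pvT] at ht'
                | cons e t'' => exact ⟨e, t'', rfl⟩
              have he : e ≠ '_' := hhd' e rfl
              obtain ⟨r', rs', hsh⟩ := pvT_consShape t'' e he
              rw [hsh] at ht'
              injection ht' with h1 h2
              subst h1; subst h2
              rw [pvInter_consHead]
              simp
            rw [if_neg hne, if_neg (by simp [hne]), pvInter_cons_cons]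
            simp
        · have hadj' : pvAdj (d :: t') = false := pvAdj_tail _ _ hadj
          have hIH : pvRS (d :: t') = List.intercalate ['_'] (pvT (d :: t')) := by
            apply ih _ (by simp at hlen ⊢; omega) hadj' (by intro e he; simp at he; simpa [he] using hd)
          obtain ⟨r, rs, hsh⟩ := pvT_consShape t' d hd
          have hne : pvRS (d :: t') ≠ [] := by
            rw [hIH, hsh, pvInter_consHead]
            simp
          rw [pvRS_cons, if_neg hne, hIH, pvT_cons2 hc hd hsh, hsh, pvInter_consHead,
            pvInter_consHead, pvInter_consHead]

lemma pvStrip_noAdj : ∀ (n : Nat) (s : List Char), s.length ≤ n → pvAdj s = false →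
    PySem.Chars.stripChars s ['_'] = List.intercalate ['_'] (pvT s) := by
  intro n
  induction n with
  | zero =>
    intro s h _
    have : s = [] := by cases s <;> simp_all
    subst this
    simp [PySem.Chars.stripChars, List.intercalate, pvT]
  | succ m ih =>
    intro s hlen hadj
    match s with
    | [] => simp [PySem.Chars.stripChars, List.intercalate, pvT]
    | c :: t =>
      by_cases hc : c = '_'
      · subst hc
        have : PySem.Chars.stripChars ('_' :: t) ['_'] = PySem.Chars.stripChars t ['_'] := by
          simp [PySem.Chars.stripChars, List.dropWhile]
        rw [this, pvT_us]
        exact ih t (by simp at hlen ⊢; omega) (pvAdj_tail _ _ hadj)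
      · have : PySem.Chars.stripChars (c :: t) ['_'] = pvRS (c :: t) := by
          simp [PySem.Chars.stripChars, pvRS, List.dropWhile, hc]
        rw [this]
        exact pvRS_noAdj (m + 1) (c :: t) hlen hadj (by intro e he; simp at he; simpa [he] using hc)

lemma pvCollapse_spec : ∀ (fuel : Nat) (s : List Char), s.length ≤ fuel →
    PySem.Chars.stripChars (pvCollapseA fuel s) ['_'] = List.intercalate ['_'] (pvT s) := by
  intro fuel
  induction fuel with
  | zero =>
    intro s h
    have : s = [] := by cases s <;> simp_all
    subst this
    simp [pvCollapseA, PySem.Chars.stripChars, List.intercalate, pvT]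
  | succ n ih =>
    intro s hlen
    rw [pvCollapseA, pvIsIn_eq]
    cases hadj : pvAdj s with
    | false =>
      simp only [Bool.false_eq_true, if_false]
      exact pvStrip_noAdj (n + 1) s hlen hadj
    | true =>
      simp only [if_true, pvReplaceEq]
      rw [ih _ (by have := pvRep_len s hadj; omega), pvT_rep]

lemma pvUpper_ne (c : Char) (h : PySem.Chars.isalnum c = true) : PySem.Chars.upperChar c ≠ '_' := by
  rw [PySem.Chars.upperChar]
  by_cases hl : PySem.Chars.islower c = true
  · rw [if_pos hl]
    have hrange : 97 ≤ c.toNat ∧ c.toNat ≤ 122 := by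
      simp only [PySem.Chars.islower, Bool.and_eq_true, decide_eq_true_eq, Char.le_def] at hl
      exact ⟨hl.1, hl.2⟩
    intro heq
    have h2 := congrArg Char.toNat heq
    rw [Char.toNat_ofNat] at h2
    rw [if_pos (Or.inl (by omega) : (c.toNat - 32).isValidChar)] at h2
    have : ('_').toNat = 95 := by decide
    omega
  · rw [if_neg hl]
    intro heq
    subst heq
    exact absenum h
where absenum : PySem.Chars.isalnum '_' = true → False := by decide

lemma pvR_skip {c : Char} {t : List Char} (hc : PySem.Chars.isalnum c = false) :
    pvR (c :: t) = pvR t := by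
  rw [pvR.eq_def]
  simp [hc]

lemma pvR_cons_eq {c : Char} {t : List Char} (hc : PySem.Chars.isalnum c = true) :
    pvR (c :: t) = (match t with
      | [] => [[c]]
      | d :: _ =>
        if PySem.Chars.isalnum d = true then
          match pvR t with
          | [] => [[c]]
          | r :: rs => (c :: r) :: rs
        else [c] :: pvR t) := by
  rw [pvR.eq_def]
  simp [hc]

lemma pvR_single {c : Char} (hc : PySem.Chars.isalnum c = true) : pvR [c] = [[c]] := by
  rw [pvR_cons_eq hc]

lemma pvR_cons_us {c d : Char} {t : List Char} (hc : PySem.Chars.isalnum c = true)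
    (hd : PySem.Chars.isalnum d = false) : pvR (c :: d :: t) = [c] :: pvR (d :: t) := by
  rw [pvR_cons_eq hc]
  simp [hd]

lemma pvR_consShape : ∀ (t : List Char) (c : Char), PySem.Chars.isalnum c = true →
    ∃ r rs, pvR (c :: t) = (c :: r) :: rs := by
  intro t
  induction t with
  | nil => intro c hc; rw [pvR_single hc]; exact ⟨[], [], rfl⟩
  | cons d t' ih =>
    intro c hc
    rw [pvR_cons_eq hc]
    by_cases hd : PySem.Chars.isalnum d = true
    · simp only [if_pos hd]
      obtain ⟨r, rs, hr⟩ := ih d hd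
      rw [hr]
      exact ⟨d :: r, rs, rfl⟩
    · simp only [if_neg hd]
      exact ⟨[], pvR (d :: t'), rfl⟩

lemma pvR_cons2 {c d : Char} {t r : List Char} {rs : List (List Char)}
    (hc : PySem.Chars.isalnum c = true) (hd : PySem.Chars.isalnum d = true)
    (h : pvR (d :: t) = (d :: r) :: rs) : pvR (c :: d :: t) = (c :: d :: r) :: rs := by
  rw [pvR_cons_eq hc]
  simp only [if_pos hd, h]

lemma pvT_map : ∀ (cs : List Char), pvT (cs.map pvF) = (pvR cs).map (List.map PySem.Chars.upperChar) := by
  intro cs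
  induction cs with
  | nil => simp [pvT, pvR]
  | cons c t ih =>
    by_cases hc : PySem.Chars.isalnum c = true
    · have hfc : pvF c = PySem.Chars.upperChar c := by simp [pvF, hc]
      have hu : PySem.Chars.upperChar c ≠ '_' := pvUpper_ne c hc
      match t with
      | [] =>
        simp only [List.map_cons, List.map_nil, hfc]
        rw [pvT_single hu, pvR_single hc]
        simp
      | d :: t' =>
        by_cases hd : PySem.Chars.isalnum d = true
        · have hfd : pvF d = PySem.Chars.upperChar d := by simp [pvF, hd]
          have hud : PySem.Chars.upperChar d ≠ '_' := pvUpper_ne d hd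
          obtain ⟨r, rs, hsh⟩ := pvR_consShape t' d hd
          have hmap : pvT (List.map pvF (d :: t')) =
              (PySem.Chars.upperChar d :: List.map PySem.Chars.upperChar r) ::
                List.map (List.map PySem.Chars.upperChar) rs := by
            rw [ih, hsh]
            simp
          simp only [List.map_cons, hfc, hfd] at hmap ⊢
          rw [pvT_cons2 hu hud hmap, pvR_cons2 hc hd hsh]
          simp
        · have hdf : PySem.Chars.isalnum d = false := by simpa using hd
          have hfd : pvF d = '_' := by simp [pvF, hdf]
          have hIH' : pvT (List.map pvF t') = (pvR t').map (List.map PySem.Chars.upperChar) := by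
            have := ih
            simp only [List.map_cons, hfd] at this
            rwa [pvT_us, pvR_skip hdf] at this
          simp only [List.map_cons, hfc, hfd]
          rw [pvT_cons_us hu, pvR_cons_us hc hdf, pvR_skip hdf]
          simp only [List.map_cons, hIH']
          simp
    · have hcf : PySem.Chars.isalnum c = false := by simpa using hc
      have hfc : pvF c = '_' := by simp [pvF, hcf]
      simp only [List.map_cons, hfc]
      rw [pvT_us, pvR_skip hcf, ih]

lemma pvR_allAlnum : ∀ (buf : List Char), (∀ c ∈ buf, PySem.Chars.isalnum c = true) →
    pvR buf = if buf.isEmpty then [] else [buf] := by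
  intro buf
  induction buf with
  | nil => simp [pvR]
  | cons b buf' ih =>
    intro h
    have hb : PySem.Chars.isalnum b = true := h b (by simp)
    match buf' with
    | [] => rw [pvR_single hb]; simp
    | d :: t =>
      have hd : PySem.Chars.isalnum d = true := h d (by simp)
      have := ih (fun c hc => h c (by simp [hc]))
      simp only [List.isEmpty_cons, Bool.false_eq_true, if_false] at this
      rw [pvR_cons2 hb hd (by simpa using this)]
      simp

lemma pvR_append_stop (c : Char) (t : List Char) (hc : PySem.Chars.isalnum c = false) :
    ∀ buf, (∀ x ∈ buf, PySem.Chars.isalnum x = true) →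
    pvR (buf ++ c :: t) = (if buf.isEmpty then [] else [buf]) ++ pvR t := by
  intro buf
  induction buf with
  | nil => intro _; simp [pvR_skip hc]
  | cons b buf' ih =>
    intro h
    have hb : PySem.Chars.isalnum b = true := h b (by simp)
    have hih := ih (fun x hx => h x (by simp [hx]))
    match buf' with
    | [] =>
      simp only [List.nil_append, List.isEmpty_nil, if_pos rfl] at hih
      simp only [List.cons_append, List.nil_append]
      rw [pvR_cons_us hb hc, pvR_skip hc]
      simp
    | d :: t' =>
      have hd : PySem.Chars.isalnum d = true := h d (by simp)
      simp only [List.isEmpty_cons, Bool.false_eq_true, if_false, List.cons_append] at hih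
      obtain ⟨r, rs, hsh⟩ : ∃ r rs, pvR (d :: (t' ++ c :: t)) = (d :: r) :: rs :=
        pvR_consShape _ d hd
      simp only [List.cons_append]
      rw [pvR_cons2 hb hd hsh]
      rw [hsh] at hih
      injection hih with h1 h2
      injection h1 with h3 h4
      simp [h4, h2]

lemma pvRW_eq : ∀ (cs buf : List Char), (∀ c ∈ buf, PySem.Chars.isalnum c = true) →
    pvRW buf cs = pvR (buf ++ cs) := by
  intro cs
  induction cs with
  | nil =>
    intro buf h
    rw [pvRW]
    simp only [List.append_nil]
    rw [pvR_allAlnum buf h]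
  | cons c t ih =>
    intro buf h
    rw [pvRW]
    by_cases hc : PySem.Chars.isalnum c = true
    · have hall : ∀ x ∈ buf ++ [c], PySem.Chars.isalnum x = true := by
        intro x hx
        rcases List.mem_append.mp hx with h1 | h1
        · exact h x h1
        · simp at h1; rwa [h1]
      rw [if_pos hc, ih (buf ++ [c]) hall]
      simp
    · have hcf : PySem.Chars.isalnum c = false := by simpa using hc
      rw [if_neg (by simp [hcf]), ih [] (by simp)]
      simp only [List.nil_append]
      rw [pvR_append_stop c t hcf buf h]

lemma pvFoldB : ∀ (cs : List Char) (toks : List (List Char)) (buf : List Char),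
    (let st := cs.foldl (fun (st : List (List Char) × List Char) ch =>
        if PySem.Chars.isalnum ch then (st.1, st.2 ++ [ch])
        else if st.2.isEmpty then st else (st.1 ++ [st.2], ([] : List Char))) (toks, buf);
      if st.2.isEmpty then st.1 else st.1 ++ [st.2]) = toks ++ pvRW buf cs := by
  intro cs
  induction cs with
  | nil =>
    intro toks buf
    rw [pvRW]
    by_cases h : buf.isEmpty <;> simp [List.foldl, h]
  | cons c t ih =>
    intro toks buf
    rw [pvRW]
    by_cases hc : PySem.Chars.isalnum c = true
    · simp only [List.foldl_cons, if_pos hc]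
      exact ih toks (buf ++ [c])
    · have hcf : PySem.Chars.isalnum c = false := by simpa using hc
      simp only [List.foldl_cons, hcf, Bool.false_eq_true, if_false]
      by_cases hb : buf.isEmpty
      · have : buf = [] := by simpa [List.isEmpty_iff] using hb
        subst this
        simp only [List.isEmpty_nil, if_true]
        rw [ih toks []]
        simp
      · simp only [hb, Bool.false_eq_true, if_false]
        rw [ih (toks ++ [buf]) []]
        simp [hb]

lemma pvMapInter (g : Char → Char) (sep : List Char) (L : List (List Char)) :
    (List.intercalate sep L).map g = List.intercalate (sep.map g) (L.map (List.map g)) := by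
  induction L with
  | nil => simp [List.intercalate]
  | cons x xs ih =>
    cases xs with
    | nil => simp [List.intercalate]
    | cons y ys =>
      rw [pvInter_cons_cons, List.map_cons,
        show (List.map (List.map g) (y :: ys)) = List.map g y :: List.map (List.map g) ys from rfl,
        pvInter_cons_cons]
      simp only [List.map_append, ih]
      simp

-- ===== VERDICT (by name: the statement is the Claim_ definition above) =====
theorem sanitize_constant_name_py_spec : Claim_equal_sanitize_constant_name_py := by
  intro m _
  unfold Spec_sanitize_constant_name_py
  unfold sanitize_constant_name_py sanitize_constant_name_py_alt
  simp only []
  rw [show (fun (acc : List Char) ch =>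
      acc ++ [if PySem.Chars.isalnum ch then PySem.Chars.upperChar ch else '_']) =
      (fun acc ch => acc ++ [pvF ch]) from rfl]
  rw [PySem.List.foldl_append_singleton_eq_map pvF m.toList []]
  simp only [List.nil_append]
  rw [pvCollapse_spec _ _ le_rfl, pvT_map]
  have hB := pvFoldB m.toList [] []
  simp only [List.nil_append] at hB
  rw [hB, pvRW_eq m.toList [] (by simp)]
  simp only [List.nil_append]
  rw [PySem.Chars.join]
  have : PySem.Chars.upper (List.intercalate ['_'] (pvR m.toList)) =
      List.intercalate ['_'] ((pvR m.toList).map (List.map PySem.Chars.upperChar)) := by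
    rw [PySem.Chars.upper, pvMapInter]
    congr 1
  rw [this]
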